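-- pv_equiv track=rewrite | github.com/Fawzi-Boussentouh/gsmlibs | gsmmodem/util.py | gsm_decode
-- ===== SOURCE A (Python) =====
-- ext = (u"````````````````````^```````````````````{}`````\\````````````[~]`"
--        u"|````````````````````````````````````?``````````````````````````")
--
-- def chunks(l, n):
--     if n < 1:
--         n = 1
--     return [l[i:i + n] for i in range(0, len(l), n)]
--
-- def gsm_decode(codedtext):
--     hexparts = chunks(codedtext, 2)
--     number = 0
--     bitcount = 0
--     output = ''
--     found_external = False
--     for byte in hexparts:
--         byte = int(byte, 16);
--
--         # add data on to the end
--         number = number + (byte << bitcount)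
--         # increase the counter
--         bitcount = bitcount + 1
--         # output the first 7 bits
--         if number % 128 == 27:
--             '''skip'''
--             found_external = True
--         else:
--             if found_external == True:
--                 character = ext[number % 128]
--                 found_external = False
--             else:
--                 character = chr(number % 128)
--             output = output + character
--
--         # then throw them away
--         number = number >> 7
--         # every 7th letter you have an extra one in the buffer
--         if bitcount == 7:
--             if number % 128 == 27:
--                 '''skip'''
--                 found_external = True
--             else:
--                 if found_external == True:
--                     character = ext[number % 128]
--                     found_external = False
--                 else:
--                     character = chr(number % 128)
--                 output = output + character
--
--             bitcount = 0
--             number = 0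
--     return output
-- ===== SOURCE B (Python) =====
-- ext = (u"````````````````````^```````````````````{}`````\\````````````[~]`"
--        u"|````````````````````````````````````?``````````````````````````")
--
-- def gsm_decode(codedtext):
--     # phase 1: parse the hex two characters at a time into a little-endian byte list
--     nbytes = (len(codedtext) + 1) // 2
--     vals = [int(codedtext[2 * i:2 * i + 2], 16) for i in range(nbytes)]
--     # phase 2: read every septet of the bit stream straight out of a two-byte window,
--     # then apply the escape mapping in a separate pass
--     septets = []
--     for j in range(8 * nbytes // 7):
--         lo, sh = divmod(7 * j, 8)
--         w = vals[lo] + ((vals[lo + 1] << 8) if lo + 1 < nbytes else 0)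
--         septets.append((w >> sh) % 128)
--     out = []
--     esc = False
--     for s in septets:
--         if s == 27:
--             esc = True
--         elif esc:
--             out.append(ext[s])
--             esc = False
--         else:
--             out.append(chr(s))
--     return ''.join(out)
-- ===== Notes on version B (the rewrite author's own statement) =====
-- stated objective: alternative
-- what changed: Replaces A's interleaved single-pass accumulator (7-bit remainder carried byte to byte, bitcount reset every 7 bytes, escape handling inline) with a two-phase decode: parse the byte list first, read each septet j independently out of a two-byte window at bit offset 7*j, then apply the escape mapping in a separate pass.
-- outside the precondition, e.g. on gsm_decode('-f00ff'): A returns 'q\x7f{', B returns 'q\x7f|'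
import Mathlib
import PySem

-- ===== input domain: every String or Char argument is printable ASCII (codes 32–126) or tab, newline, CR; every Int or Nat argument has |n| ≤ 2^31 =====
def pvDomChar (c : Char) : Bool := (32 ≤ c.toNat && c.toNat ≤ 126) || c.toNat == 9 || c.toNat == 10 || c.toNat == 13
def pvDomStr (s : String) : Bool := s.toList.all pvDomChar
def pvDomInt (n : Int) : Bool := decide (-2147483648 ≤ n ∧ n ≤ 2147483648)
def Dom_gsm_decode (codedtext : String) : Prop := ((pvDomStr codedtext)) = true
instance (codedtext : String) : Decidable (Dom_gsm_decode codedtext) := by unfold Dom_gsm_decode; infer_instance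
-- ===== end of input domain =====

-- B parses the byte list first and then reads each septet independently from a two-byte window
-- of the bit stream, instead of A's interleaved per-byte accumulator (objective: alternative).

-- module-level constant 'ext'
def pvExt : String := "````````````````````^```````````````````{}`````\\````````````[~]`|````````````````````````````````````?``````````````````````````"

-- ext[s]  (s is always _ % 128, hence in range 0..127, so the default is unreachable)
def pvExtGet (s : Int) : Char := (PySem.List.pyGet? pvExt.toList s).getD '`'

-- int(c, 16) on a single character; exact on hex digits (compared by character code)
def pvHexDigit? (c : Char) : Option Int :=
  if 48 ≤ c.toNat ∧ c.toNat ≤ 57 then some ((c.toNat : Int) - 48)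
  else if 97 ≤ c.toNat ∧ c.toNat ≤ 102 then some ((c.toNat : Int) - 87)
  else if 65 ≤ c.toNat ∧ c.toNat ≤ 70 then some ((c.toNat : Int) - 55)
  else none

-- b = 16*b + int(c,16) over the characters of a chunk, Option-threaded (none = ValueError)
def pvHexFold (chunk : List Char) : Option Int :=
  chunk.foldl (fun b? c => b?.bind fun b => (pvHexDigit? c).map fun d => 16 * b + d) (some 0)

-- ===== PORT A =====

-- whitespace as stripped by Python's int()
def pvWsCode (n : Nat) : Bool := n = 32 || n = 9 || n = 10 || n = 13 || n = 11 || n = 12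
def pvIsWs (c : Char) : Bool := pvWsCode c.toNat

def pvStrip (cs : List Char) : List Char :=
  ((cs.dropWhile pvIsWs).reverse.dropWhile pvIsWs).reverse

-- int(s, 16) on a chunk: strip whitespace, optional sign, then hex digits
-- (exact for the ≤ 2-character chunks this program feeds it)
def pvIntHex? (cs : List Char) : Option Int :=
  let t := pvStrip cs
  if t = [] then none
  else if t.head! = '+' then (if t.tail = [] then none else pvHexFold t.tail)
  else if t.head! = '-' then (if t.tail = [] then none else (pvHexFold t.tail).map (fun v => -v))
  else pvHexFold t

def pvChunks (l : List Char) (n : Int) : List (List Char) :=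
  let n := if n < 1 then 1 else n
  (PySem.List.pyRange 0 (l.length : Int) n).map
    (fun i => PySem.List.slice l (some i) (some (i + n)))

-- the for-loop of gsm_decode, state (number, bitcount, output, found_external); none = ValueError
def pvALoop : List (List Char) → Int → Int → List Char → Bool → Option (List Char)
  | [], _, _, out, _ => some out
  | chunk :: rest, number, bitcount, out, fe =>
    match pvIntHex? chunk with
    | none => none
    | some byte =>
      let number1 := number + (byte <<< bitcount.toNat)
      let bitcount1 := bitcount + 1
      let st1 : List Char × Bool :=
        if PySem.Int.mod number1 128 = 27 then (out, true)
        else if fe then (out ++ [pvExtGet (PySem.Int.mod number1 128)], false)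
        else (out ++ [Char.ofNat (PySem.Int.mod number1 128).toNat], false)
      let number2 := number1 >>> (7 : Nat)
      if bitcount1 = 7 then
        let st2 : List Char × Bool :=
          if PySem.Int.mod number2 128 = 27 then (st1.1, true)
          else if st1.2 then (st1.1 ++ [pvExtGet (PySem.Int.mod number2 128)], false)
          else (st1.1 ++ [Char.ofNat (PySem.Int.mod number2 128).toNat], false)
        pvALoop rest 0 0 st2.1 st2.2
      else pvALoop rest number2 bitcount1 st1.1 st1.2

def gsm_decode (codedtext : String) : String :=
  ((pvALoop (pvChunks codedtext.toList 2) 0 0 [] false).getD []).asString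

-- ===== PORT B =====

def gsm_decode_alt (codedtext : String) : String :=
  let cs := codedtext.toList
  let nbytes : Int := PySem.Int.floordiv ((cs.length : Int) + 1) 2
  let vals? : Option (List Int) := (PySem.List.pyRange 0 nbytes 1).mapM
    (fun i => pvIntHex? (PySem.List.slice cs (some (2 * i)) (some (2 * i + 2))))
  match vals? with
  | none => ""  -- unreachable under Pre_gsm_decode (Python raises ValueError there)
  | some vals =>
    let septets : List Int :=
      (PySem.List.pyRange 0 (PySem.Int.floordiv (8 * nbytes) 7) 1).map
        (fun j =>
          let lo := PySem.Int.floordiv (7 * j) 8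
          let sh := PySem.Int.mod (7 * j) 8
          -- vals[lo] / vals[lo + 1]: the indices are provably in range, the default unreachable
          let w := PySem.List.pyGetD vals lo 0 +
            (if lo + 1 < nbytes then (PySem.List.pyGetD vals (lo + 1) 0) <<< (8 : Nat) else 0)
          PySem.Int.mod (w >>> sh.toNat) 128)
    (septets.foldl
      (fun (st : List Char × Bool) s =>
        if s = 27 then (st.1, true)
        else if st.2 then (st.1 ++ [pvExtGet s], false)
        else (st.1 ++ [Char.ofNat s.toNat], false))
      ([], false)).1.asString

-- ===== PRECONDITION & SPEC =====
def pvNB (cs : List Char) : Nat := (cs.length + 1) / 2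
def pvChunkAt (cs : List Char) (k : Nat) : List Char := (cs.drop (2 * k)).take 2
def pvHexCode (n : Nat) : Bool :=
  (48 ≤ n && n ≤ 57) || (97 ≤ n && n ≤ 102) || (65 ≤ n && n ≤ 70)
-- a 2-character chunk that Python's int with base 16 accepts with a NONNEGATIVE value
def pvChunkOk : List Char → Bool
  | [c] => pvHexCode c.toNat
  | [c0, c1] => (pvHexCode c0.toNat && pvHexCode c1.toNat)
      || ((pvWsCode c0.toNat || c0 = '+') && pvHexCode c1.toNat)
      || (pvHexCode c0.toNat && pvWsCode c1.toNat)
  | _ => false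
-- Pre_ requires every 2-character chunk to be hex digits with at most leading/trailing
-- whitespace or a plus sign (everything Python's int with base 16 accepts except a minus
-- sign): on other inputs A almost always raises ValueError, and on chunks carrying a minus
-- sign (a negative byte) A's reset of its 7-byte accumulator diverges from B's positional
-- reading of the bit stream.
def Pre_gsm_decode (codedtext : String) : Prop :=
  ((List.range (pvNB codedtext.toList)).all fun k =>
    pvChunkOk (pvChunkAt codedtext.toList k)) = true
instance (codedtext : String) : Decidable (Pre_gsm_decode codedtext) := by
  unfold Pre_gsm_decode; infer_instance

def pvWitness_gsm_decode : String := "d4f29c1b14"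

def Spec_gsm_decode (codedtext : String) (out : String) : Prop := out = gsm_decode_alt codedtext
instance (codedtext : String) (out : String) : Decidable (Spec_gsm_decode codedtext out) := by
  unfold Spec_gsm_decode; infer_instance

-- ===== CLAIM (what is proved, stated in full; the proofs are below) =====
def Claim_equal_gsm_decode : Prop := ∀ (codedtext : String), Dom_gsm_decode codedtext → Pre_gsm_decode codedtext → Spec_gsm_decode codedtext (gsm_decode codedtext)

-- ===== LEMMAS AND PROOFS =====

-- proof-side: one parsed byte, the byte list
def pvByteVal (cs : List Char) (k : Nat) : Int := (pvIntHex? (pvChunkAt cs k)).getD 0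
def pvBytes (cs : List Char) : List Int := (List.range (pvNB cs)).map (pvByteVal cs)

-- proof-side: the little-endian big integer of a byte list
def pvBigN : List Int → Int
  | [] => 0
  | b :: bs => b + 256 * pvBigN bs

-- proof-side: the septet stream A produces (same state machine, output only)
def pvSepA : List Int → Int → Int → List Int
  | [], _, _ => []
  | b :: bs, number, bitcount =>
    let number1 := number + (b <<< bitcount.toNat)
    let number2 := number1 >>> (7 : Nat)
    if bitcount + 1 = 7 then
      PySem.Int.mod number1 128 :: PySem.Int.mod number2 128 :: pvSepA bs 0 0
    else
      PySem.Int.mod number1 128 :: pvSepA bs number2 (bitcount + 1)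

-- proof-side: the escape mapping applied to a finished septet stream
def pvEsc : List Int → Bool → List Char
  | [], _ => []
  | s :: r, fe =>
    if s = 27 then pvEsc r true
    else (if fe then pvExtGet s else Char.ofNat s.toNat) :: pvEsc r false

theorem pvMod128 (x : Int) : PySem.Int.mod x 128 = x % 128 :=
  PySem.Int.mod_eq_emod_of_pos (by norm_num)

theorem pvFilterMap_eq_map {α β : Type} (l : List α) (f : α → Option β) (g : α → β)
    (h : ∀ x ∈ l, f x = some (g x)) : l.filterMap f = l.map g := by
  induction l with
  | nil => rfl
  | cons a t ih =>
    simp [List.filterMap_cons, h a (by simp), ih (fun x hx => h x (by simp [hx]))]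

-- A's loop, when every chunk parses, is pvEsc of pvSepA
theorem pvALoop_eq (cl : List (List Char)) :
    ∀ (num bc : Int) (out : List Char) (fe : Bool),
      (∀ ch ∈ cl, (pvIntHex? ch).isSome) →
      pvALoop cl num bc out fe =
        some (out ++ pvEsc (pvSepA (cl.filterMap pvIntHex?) num bc) fe) := by
  induction cl with
  | nil => intro num bc out fe _; simp [pvALoop, pvSepA, pvEsc]
  | cons ch rest ih =>
    intro num bc out fe h
    obtain ⟨v, hv⟩ := Option.isSome_iff_exists.mp (h ch (by simp))
    have hrest : ∀ c ∈ rest, (pvIntHex? c).isSome := fun c hc => h c (by simp [hc])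
    rw [show (ch :: rest).filterMap pvIntHex? = v :: rest.filterMap pvIntHex? by
      simp [List.filterMap_cons, hv]]
    simp only [pvALoop, hv, pvSepA]
    split_ifs with h7 h27a hfe h27b h27b hfe2 h27a hfe <;>
      simp_all [pvEsc, ih, List.append_assoc]

-- B's escape fold is pvEsc
theorem pvBFold_eq (l : List Int) :
    ∀ (out : List Char) (fe : Bool),
      (l.foldl
        (fun (st : List Char × Bool) s =>
          if s = 27 then (st.1, true)
          else if st.2 then (st.1 ++ [pvExtGet s], false)
          else (st.1 ++ [Char.ofNat s.toNat], false))
        (out, fe)).1 = out ++ pvEsc l fe := by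
  induction l with
  | nil => intro out fe; simp [pvEsc]
  | cons s r ih =>
    intro out fe
    simp only [List.foldl_cons, pvEsc]
    split_ifs with h27 hfe <;> simp [ih, List.append_assoc]

-- arithmetic helpers
theorem pvEmodStep (x y : Int) (t : Nat) : (x + y * 2 ^ (t + 7)) % 128 = x % 128 := by
  have h : x + y * 2 ^ (t + 7) = x + 128 * (y * 2 ^ t) := by rw [pow_add]; ring
  rw [h, Int.add_mul_emod_self_left]

theorem pvEdivStep (x y : Int) (t : Nat) : (x + y * 2 ^ (t + 7)) / 128 = x / 128 + y * 2 ^ t := by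
  have h : x + y * 2 ^ (t + 7) = x + 128 * (y * 2 ^ t) := by rw [pow_add]; ring
  rw [h, Int.add_mul_ediv_left _ _ (by norm_num : (128:Int) ≠ 0)]

theorem pvEdivPow (M : Int) (j t : Nat) : M / 2 ^ (t + 7 * j) = (M / 2 ^ t) / 2 ^ (7 * j) := by
  rw [pow_add, ← Int.ediv_ediv_of_nonneg (by positivity)]

-- the heart: A's septet stream from state (num, bc) is septet extraction from the big integer
theorem pvEmodStep' (x y : Int) (u : Nat) (hu : 7 ≤ u) : (x + y * 2 ^ u) % 128 = x % 128 := by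
  obtain ⟨t, rfl⟩ : ∃ t, u = t + 7 := ⟨u - 7, by omega⟩
  exact pvEmodStep x y t

theorem pvEdivStep' (x y : Int) (u : Nat) (hu : 7 ≤ u) :
    (x + y * 2 ^ u) / 128 = x / 128 + y * 2 ^ (u - 7) := by
  obtain ⟨t, rfl⟩ : ∃ t, u = t + 7 := ⟨u - 7, by omega⟩
  simpa using pvEdivStep x y t

theorem pvSepA_eq (bs : List Int) : ∀ (num bc : Int), 0 ≤ bc → bc ≤ 6 →
    0 ≤ num → num < 2 ^ bc.toNat → (∀ b ∈ bs, 0 ≤ b ∧ b < 256) →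
    pvSepA bs num bc =
      (List.range (bs.length + (bc.toNat + bs.length) / 7)).map
        (fun j => ((num + pvBigN bs * 2 ^ bc.toNat) / 2 ^ (7 * j)) % 128) := by
  induction bs with
  | nil =>
    intro num bc h0 h6 _ _ _
    have hc : (bc.toNat + 0) / 7 = 0 := by omega
    simp [pvSepA, pvBigN, hc]
    omega
  | cons b bs ih =>
    intro num bc h0 h6 hn0 hnlt hb
    obtain ⟨hb0, hb256⟩ := hb b (by simp)
    have hbs : ∀ x ∈ bs, 0 ≤ x ∧ x < 256 := fun x hx => hb x (by simp [hx])
    lift bc to Nat using h0 with t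
    have ht6 : t ≤ 6 := by exact_mod_cast h6
    simp only [Int.toNat_natCast] at hnlt ⊢
    have h2t : (0:Int) < 2 ^ t := by positivity
    have hnum1lt : num + b * 2 ^ t < 2 ^ (t + 8) := by
      have h1 : b * 2 ^ t ≤ 255 * 2 ^ t :=
        mul_le_mul_of_nonneg_right (by omega) (le_of_lt h2t)
      have h2 : (2:Int) ^ (t + 8) = 256 * 2 ^ t := by rw [pow_add]; ring
      linarith
    have hnum10 : 0 ≤ num + b * 2 ^ t := by positivity
    have hM : num + pvBigN (b :: bs) * 2 ^ t =
        (num + b * 2 ^ t) + pvBigN bs * 2 ^ (t + 8) := by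
      simp only [pvBigN]; rw [pow_add]; ring
    simp only [pvSepA, Int.shiftLeft_eq, Int.shiftRight_eq_div_pow, pvMod128,
      Int.toNat_natCast, List.length_cons]
    have h128 : ((2 ^ 7 : Nat) : Int) = 128 := by norm_num
    rw [h128]
    by_cases h7 : (t : Int) + 1 = 7
    · -- t = 6 : the 7-byte wrap, two septets out, state resets
      have ht : t = 6 := by exact_mod_cast (by omega : (t:Int) = 6)
      subst ht
      simp only [if_pos h7]
      have hcnt : bs.length + 1 + (6 + (bs.length + 1)) / 7 =
          (bs.length + bs.length / 7) + 1 + 1 := by omega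
      rw [hM, hcnt, List.range_succ_eq_map, List.map_cons,
        List.range_succ_eq_map, List.map_cons, List.map_map]
      have hrec := ih 0 0 (le_refl 0) (by norm_num) (le_refl 0) (by norm_num) hbs
      simp only [Int.toNat_zero, pow_zero, mul_one, Nat.zero_add, Nat.add_zero,
        zero_add] at hrec
      refine List.cons_eq_cons.mpr ⟨?_, List.cons_eq_cons.mpr ⟨?_, ?_⟩⟩
      · rw [show (7 * 0 : Nat) = 0 by norm_num, pow_zero, Int.ediv_one,
          pvEmodStep' _ _ (6 + 8) (by omega)]
      · beta_reduce
        rw [show (7 * Nat.succ 0 : Nat) = 7 by norm_num,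
          show ((2:Int) ^ 7) = 128 by norm_num,
          pvEdivStep' _ _ (6 + 8) (by omega),
          show (6 + 8 - 7 : Nat) = 7 by norm_num,
          show ((2:Int) ^ 7) = 128 by norm_num, mul_comm (pvBigN bs) (128:Int),
          Int.add_mul_emod_self_left]
      · rw [hrec, List.map_map]
        apply List.map_congr_left
        intro j _
        simp only [Function.comp]
        beta_reduce
        rw [show (7 * Nat.succ (Nat.succ j) : Nat) = (6 + 8) + 7 * j by omega,
          pvEdivPow,
          Int.add_mul_ediv_right _ _ (by positivity : ((2:Int) ^ (6 + 8)) ≠ 0),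
          Int.ediv_eq_zero_of_lt hnum10 hnum1lt, zero_add]
    · -- t ≤ 5 : one septet out, remainder carried
      simp only [if_neg h7]
      have hdiv0 : 0 ≤ (num + b * 2 ^ t) / 128 := Int.ediv_nonneg hnum10 (by norm_num)
      have hdivlt : (num + b * 2 ^ t) / 128 < 2 ^ (t + 1) := by
        rw [Int.ediv_lt_iff_lt_mul (by norm_num : (0:Int) < 128)]
        have h2 : (2:Int) ^ (t + 1) * 128 = 2 ^ (t + 8) := by
          rw [pow_add, pow_add]; ring
        rw [h2]; exact hnum1lt
      have hrec := ih ((num + b * 2 ^ t) / 128) ((t : Int) + 1)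
        (by positivity) (by omega) hdiv0
        (by simpa using hdivlt) hbs
      have htn : ((t : Int) + 1).toNat = t + 1 := by omega
      rw [htn] at hrec
      rw [hrec, hM]
      have hcnt : bs.length + 1 + (t + (bs.length + 1)) / 7 =
          (bs.length + (t + 1 + bs.length) / 7) + 1 := by omega
      rw [hcnt, List.range_succ_eq_map, List.map_cons, List.map_map]
      refine List.cons_eq_cons.mpr ⟨?_, ?_⟩
      · rw [show (7 * 0 : Nat) = 0 by norm_num, pow_zero, Int.ediv_one,
          pvEmodStep' _ _ (t + 8) (by omega)]
      · apply List.map_congr_left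
        intro j _
        simp only [Function.comp]
        beta_reduce
        rw [show (7 * Nat.succ j : Nat) = 7 + 7 * j by omega, pvEdivPow,
          show ((2:Int) ^ 7) = 128 by norm_num,
          pvEdivStep' _ _ (t + 8) (by omega),
          show (t + 8 - 7 : Nat) = t + 1 by omega]

-- chunk shape of A's chunks call
theorem pvChunks_eq (cs : List Char) :
    pvChunks cs 2 = (List.range (pvNB cs)).map (pvChunkAt cs) := by
  unfold pvChunks pvNB
  rw [if_neg (by norm_num : ¬ (2:Int) < 1)]
  simp only []
  rw [PySem.List.pyRange_of_pos 0 (cs.length : Int) (by norm_num : (0:Int) < 2)]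
  have hcnt : (if (0:Int) < (cs.length : Int)
        then (((cs.length : Int) - 0 + 2 - 1) / 2).toNat else 0)
      = (cs.length + 1) / 2 := by
    split_ifs with h <;> omega
  rw [hcnt, List.map_map]
  apply List.map_congr_left
  intro k _
  simp only [Function.comp]
  rw [show ((0:Int) + 2 * (k:Nat)) = ((2 * k : Nat) : Int) by push_cast; ring]
  rw [show ((2 * k : Nat) : Int) + 2 = ((2 * k + 2 : Nat) : Int) by push_cast; ring]
  rw [PySem.List.slice_natCast]
  unfold pvChunkAt
  congr 1
  omega

-- hex-code facts
theorem pvHexCode_digit {c : Char} (h : pvHexCode c.toNat = true) :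
    ∃ d, pvHexDigit? c = some d ∧ 0 ≤ d ∧ d < 16 := by
  unfold pvHexCode at h
  simp only [Bool.or_eq_true, Bool.and_eq_true, decide_eq_true_eq] at h
  unfold pvHexDigit?
  split_ifs with h1 h2 h3
  · exact ⟨_, rfl, by omega, by omega⟩
  · exact ⟨_, rfl, by omega, by omega⟩
  · exact ⟨_, rfl, by omega, by omega⟩
  · exfalso; rcases h with (h | h) | h <;> omega

theorem pvHexCode_not_ws {c : Char} (h : pvHexCode c.toNat = true) : pvIsWs c = false := by
  unfold pvHexCode at h
  unfold pvIsWs pvWsCode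
  simp only [Bool.or_eq_true, Bool.and_eq_true, decide_eq_true_eq] at h
  simp only [Bool.or_eq_false_iff, decide_eq_false_iff_not]
  rcases h with (h | h) | h <;> omega

theorem pvHexCode_ne {c : Char} (h : pvHexCode c.toNat = true) : c ≠ '+' ∧ c ≠ '-' := by
  constructor <;> (intro hc; subst hc; exact absurd h (by decide))

-- an accepted chunk parses to a byte value
theorem pvChunk_parses (chunk : List Char) (hok : pvChunkOk chunk = true) :
    ∃ v, pvIntHex? chunk = some v ∧ 0 ≤ v ∧ v < 256 := by
  rcases chunk with _ | ⟨c0, _ | ⟨c1, _ | ⟨c2, r⟩⟩⟩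
  · simp [pvChunkOk] at hok
  · have h0 : pvHexCode c0.toNat = true := by simpa [pvChunkOk] using hok
    obtain ⟨d0, hd0, hl0, hu0⟩ := pvHexCode_digit h0
    obtain ⟨hp0, hm0⟩ := pvHexCode_ne h0
    have hw0 : pvIsWs c0 = false := pvHexCode_not_ws h0
    refine ⟨d0, ?_, by omega, by omega⟩
    simp [pvIntHex?, pvStrip, List.dropWhile, hw0, hp0, hm0, pvHexFold, hd0]
  · have hok' : ((pvHexCode c0.toNat && pvHexCode c1.toNat)
        || ((pvWsCode c0.toNat || decide (c0 = '+')) && pvHexCode c1.toNat)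
        || (pvHexCode c0.toNat && pvWsCode c1.toNat)) = true := hok
    simp only [Bool.or_eq_true, Bool.and_eq_true, decide_eq_true_eq] at hok'
    rcases hok' with (⟨h0, h1⟩ | ⟨h0, h1⟩) | ⟨h0, h1⟩
    · -- hex hex
      obtain ⟨d0, hd0, hl0, hu0⟩ := pvHexCode_digit h0
      obtain ⟨d1, hd1, hl1, hu1⟩ := pvHexCode_digit h1
      obtain ⟨hp0, hm0⟩ := pvHexCode_ne h0
      have hw0 : pvIsWs c0 = false := pvHexCode_not_ws h0
      have hw1 : pvIsWs c1 = false := pvHexCode_not_ws h1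
      refine ⟨16 * d0 + d1, ?_, by omega, by omega⟩
      simp [pvIntHex?, pvStrip, List.dropWhile, hw0, hw1, hp0, hm0, pvHexFold, hd0, hd1]
    · -- whitespace-or-'+' then hex
      obtain ⟨d1, hd1, hl1, hu1⟩ := pvHexCode_digit h1
      have hw1 : pvIsWs c1 = false := pvHexCode_not_ws h1
      refine ⟨d1, ?_, by omega, by omega⟩
      rcases h0 with hws | hplus
      · have hw0 : pvIsWs c0 = true := hws
        obtain ⟨hp1, hm1⟩ := pvHexCode_ne h1
        simp [pvIntHex?, pvStrip, List.dropWhile, hw0, hw1, hp1, hm1, pvHexFold, hd1]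
      · subst hplus
        simp [pvIntHex?, pvStrip, List.dropWhile,
          show pvIsWs '+' = false from by decide, hw1, pvHexFold, hd1]
    · -- hex then whitespace
      obtain ⟨d0, hd0, hl0, hu0⟩ := pvHexCode_digit h0
      obtain ⟨hp0, hm0⟩ := pvHexCode_ne h0
      have hw0 : pvIsWs c0 = false := pvHexCode_not_ws h0
      have hw1 : pvIsWs c1 = true := h1
      refine ⟨d0, ?_, by omega, by omega⟩
      simp [pvIntHex?, pvStrip, List.dropWhile, hw0, hw1, hp0, hm0, pvHexFold, hd0]
  · simp [pvChunkOk] at hok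

-- under Pre_, every chunk parses to pvByteVal, which is a byte
theorem pvParse_chunk (cs : List Char) (k : Nat)
    (hok : pvChunkOk (pvChunkAt cs k) = true) :
    pvIntHex? (pvChunkAt cs k) = some (pvByteVal cs k) ∧
      0 ≤ pvByteVal cs k ∧ pvByteVal cs k < 256 := by
  obtain ⟨v, hv, h1, h2⟩ := pvChunk_parses _ hok
  simp only [pvByteVal, hv, Option.getD_some]
  exact ⟨trivial, h1, h2⟩

theorem pvHnb (cs : List Char) :
    PySem.Int.floordiv ((cs.length : Int) + 1) 2 = ((pvNB cs : Nat) : Int) := by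
  unfold pvNB
  rw [show ((cs.length : Int) + 1) = ((cs.length + 1 : Nat) : Int) by push_cast; ring,
    show (2:Int) = ((2:Nat) : Int) from rfl, PySem.Int.floordiv_natCast]

-- B's comprehension parses exactly the byte list
theorem pvVals_eq (cs : List Char)
    (hok : ∀ k < pvNB cs, pvChunkOk (pvChunkAt cs k) = true) :
    ((PySem.List.pyRange 0 (PySem.Int.floordiv ((cs.length : Int) + 1) 2) 1).mapM
      (fun i => pvIntHex? (PySem.List.slice cs (some (2 * i)) (some (2 * i + 2)))))
      = some (pvBytes cs) := by
  rw [pvHnb, PySem.List.pyRange_one, List.mapM_map]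
  simp only [sub_zero, Int.toNat_natCast]
  have aux : ∀ n, n ≤ pvNB cs → (List.range n).mapM
      ((fun i => pvIntHex? (PySem.List.slice cs (some (2 * i)) (some (2 * i + 2)))) ∘
        (fun k : Nat => (0:Int) + (k:Nat)))
      = some ((List.range n).map (pvByteVal cs)) := by
    intro n
    induction n with
    | zero => intro _; rfl
    | succ n ihn =>
      intro hn
      rw [List.range_succ, List.mapM_append, ihn (by omega), List.map_append]
      simp only [List.mapM_cons, List.mapM_nil, Function.comp_apply, Option.bind_eq_bind,
        Option.bind_some, List.map_cons, List.map_nil]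
      rw [show ((2:Int) * ((0:Int) + (n:Nat))) = ((2 * n : Nat) : Int) by push_cast; ring]
      rw [show ((2 * n : Nat) : Int) + 2 = ((2 * n + 2 : Nat) : Int) by push_cast; ring]
      rw [PySem.List.slice_natCast]
      rw [show (cs.drop (2 * n)).take (2 * n + 2 - 2 * n) = pvChunkAt cs n by
        unfold pvChunkAt; congr 1; omega]
      rw [(pvParse_chunk cs n (hok n (by omega))).1]
      rfl
  exact aux (pvNB cs) (le_refl _)

-- splitting an exact power out of a floor division
theorem pvEdivPowSplit (x y : Int) (sh u : Nat) (h : sh ≤ u) :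
    (x + y * 2 ^ u) / 2 ^ sh = x / 2 ^ sh + y * 2 ^ (u - sh) := by
  have hx : x + y * 2 ^ u = x + (y * 2 ^ (u - sh)) * 2 ^ sh := by
    rw [mul_assoc, ← pow_add, Nat.sub_add_cancel h]
  rw [hx, Int.add_mul_ediv_right _ _ (by positivity : ((2:Int) ^ sh) ≠ 0)]

theorem pvEdivSplit2 (M : Int) (a b : Nat) : M / 2 ^ (a + b) = (M / 2 ^ a) / 2 ^ b := by
  rw [pow_add, ← Int.ediv_ediv_of_nonneg (by positivity)]

-- dropping low bytes of the big integer
theorem pvBigN_drop (lo : Nat) : ∀ (bs : List Int), (∀ b ∈ bs, 0 ≤ b ∧ b < 256) →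
    pvBigN bs / 2 ^ (8 * lo) = pvBigN (bs.drop lo) := by
  induction lo with
  | zero => intro bs _; simp
  | succ lo ih =>
    intro bs hb
    cases bs with
    | nil => simp [pvBigN]
    | cons b t =>
      obtain ⟨hb0, hb1⟩ := hb b (by simp)
      have hbt : ∀ x ∈ t, 0 ≤ x ∧ x < 256 := fun x hx => hb x (by simp [hx])
      rw [show 8 * (lo + 1) = 8 + 8 * lo by omega, pvEdivSplit2]
      rw [show pvBigN (b :: t) = b + pvBigN t * 2 ^ 8 by simp [pvBigN]; ring]
      rw [show ((2:Int) ^ 8) = 256 from by norm_num,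
        Int.add_mul_ediv_right _ _ (by norm_num : (256:Int) ≠ 0),
        Int.ediv_eq_zero_of_lt hb0 (by omega), zero_add]
      rw [ih t hbt, List.drop_succ_cons]

-- a septet of the bit stream is read from a two-byte window
theorem pvWindow (bs : List Int) (hb : ∀ b ∈ bs, 0 ≤ b ∧ b < 256) (j : Nat)
    (hj : 7 * j < 8 * bs.length) :
    ((bs.getD (7 * j / 8) 0 +
        (if 7 * j / 8 + 1 < bs.length then bs.getD (7 * j / 8 + 1) 0 * 2 ^ 8 else 0))
      / 2 ^ (7 * j % 8)) % 128 = (pvBigN bs / 2 ^ (7 * j)) % 128 := by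
  set lo := 7 * j / 8 with hlo'
  set sh := 7 * j % 8 with hsh'
  have hlo : lo < bs.length := by omega
  have hsh : sh ≤ 7 := by omega
  rw [show 7 * j = 8 * lo + sh by omega, pvEdivSplit2, pvBigN_drop lo bs hb]
  rcases hd : bs.drop lo with _ | ⟨b0, _ | ⟨b1, r⟩⟩
  · rw [List.drop_eq_nil_iff] at hd; omega
  · -- a final lone byte: the window has no high half
    have hb0' : bs[lo]? = some b0 := by
      have h0 : (bs.drop lo)[0]? = bs[lo + 0]? := List.getElem?_drop
      rw [hd] at h0
      simpa using h0.symm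
    have hlen : bs.length - lo = 1 := by
      have hl := congrArg List.length hd
      simp at hl
      omega
    have hg0 : bs.getD lo 0 = b0 := by rw [List.getD_eq_getElem?_getD, hb0']; rfl
    rw [if_neg (by omega), hg0]
    simp [pvBigN]
  · -- two bytes available
    have hb0' : bs[lo]? = some b0 := by
      have h0 : (bs.drop lo)[0]? = bs[lo + 0]? := List.getElem?_drop
      rw [hd] at h0
      simpa using h0.symm
    have hb1' : bs[lo + 1]? = some b1 := by
      have h1 : (bs.drop lo)[1]? = bs[lo + 1]? := List.getElem?_drop
      rw [hd] at h1
      simpa using h1.symm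
    have hlen : lo + 1 < bs.length := by
      have hl := congrArg List.length hd
      simp at hl
      omega
    have hg0 : bs.getD lo 0 = b0 := by rw [List.getD_eq_getElem?_getD, hb0']; rfl
    have hg1 : bs.getD (lo + 1) 0 = b1 := by rw [List.getD_eq_getElem?_getD, hb1']; rfl
    rw [if_pos hlen, hg0, hg1]
    rw [show pvBigN (b0 :: b1 :: r) = (b0 + b1 * 2 ^ 8) + pvBigN r * 2 ^ 16 by
      simp [pvBigN]; ring]
    rw [pvEdivPowSplit _ _ sh 16 (by omega)]
    rw [pvEmodStep' _ _ (16 - sh) (by omega)]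

-- ===== VERDICT (by name: the statement is the Claim_ definition above) =====
theorem gsm_decode_spec : Claim_equal_gsm_decode := by
  unfold Claim_equal_gsm_decode Spec_gsm_decode
  intro ct _ hpre
  have hok : ∀ k < pvNB ct.toList, pvChunkOk (pvChunkAt ct.toList k) = true := by
    intro k hk
    unfold Pre_gsm_decode at hpre
    rw [List.all_eq_true] at hpre
    exact hpre k (List.mem_range.mpr hk)
  have hparse := fun k hk => pvParse_chunk ct.toList k (hok k hk)
  have hbytes : ∀ b ∈ pvBytes ct.toList, 0 ≤ b ∧ b < 256 := by
    intro b hb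
    obtain ⟨k, hk, rfl⟩ := List.mem_map.mp hb
    exact (hparse k (List.mem_range.mp hk)).2
  -- A reduces to pvEsc ∘ pvSepA on the byte list
  have hA : gsm_decode ct = (pvEsc (pvSepA (pvBytes ct.toList) 0 0) false).asString := by
    unfold gsm_decode
    rw [pvChunks_eq]
    have hall : ∀ ch ∈ (List.range (pvNB ct.toList)).map (pvChunkAt ct.toList),
        (pvIntHex? ch).isSome := by
      intro ch hch
      obtain ⟨k, hk, rfl⟩ := List.mem_map.mp hch
      rw [(hparse k (List.mem_range.mp hk)).1]
      rfl
    rw [pvALoop_eq _ 0 0 [] false hall, List.filterMap_map]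
    simp only [Function.comp_def]
    rw [pvFilterMap_eq_map _ _ (pvByteVal ct.toList)
        (fun k hk => (hparse k (List.mem_range.mp hk)).1)]
    simp [pvBytes]
  -- B reduces to pvEsc of septet extraction from the big integer of the byte list
  have hlenb : (pvBytes ct.toList).length = pvNB ct.toList := by simp [pvBytes]
  have hB : gsm_decode_alt ct = (pvEsc ((List.range (8 * pvNB ct.toList / 7)).map
      (fun j => (pvBigN (pvBytes ct.toList) / 2 ^ (7 * j)) % 128)) false).asString := by
    unfold gsm_decode_alt
    simp only []
    rw [pvVals_eq ct.toList hok]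
    simp only []
    rw [show PySem.Int.floordiv (8 * PySem.Int.floordiv ((ct.toList.length : Int) + 1) 2) 7
          = ((8 * pvNB ct.toList / 7 : Nat) : Int) by
        rw [pvHnb, show ((8:Int) * ((pvNB ct.toList : Nat) : Int))
            = ((8 * pvNB ct.toList : Nat) : Int) by push_cast; ring,
          show (7:Int) = ((7:Nat) : Int) from rfl, PySem.Int.floordiv_natCast]]
    rw [PySem.List.pyRange_one]
    simp only [sub_zero, Int.toNat_natCast, List.map_map]
    rw [pvBFold_eq]
    rw [List.nil_append]
    congr 1
    refine congrArg (fun l => pvEsc l false) ?_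
    apply List.map_congr_left
    intro j hjmem
    simp only [Function.comp_def]
    beta_reduce
    rw [show ((7:Int) * ((0:Int) + (j:Nat))) = ((7 * j : Nat) : Int) by push_cast; ring]
    rw [show (8:Int) = ((8:Nat) : Int) from rfl, PySem.Int.floordiv_natCast,
      PySem.Int.mod_natCast, Int.toNat_natCast, PySem.List.pyGetD_natCast]
    rw [show (((7 * j / 8 : Nat) : Int) + 1) = ((7 * j / 8 + 1 : Nat) : Int) by push_cast; ring]
    rw [PySem.List.pyGetD_natCast, pvHnb]
    simp only [Nat.cast_lt, Int.shiftLeft_eq]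
    rw [Int.shiftRight_eq_div_pow, pvMod128]
    rw [show (((2:Nat) ^ (7 * j % 8) : Nat) : Int) = (2:Int) ^ (7 * j % 8) by push_cast; ring]
    rw [← hlenb]
    exact pvWindow (pvBytes ct.toList) hbytes j
      (by rw [hlenb]; have := List.mem_range.mp hjmem; omega)
  rw [hA, hB]
  rw [pvSepA_eq (pvBytes ct.toList) 0 0 (le_refl 0) (by norm_num) (le_refl 0)
    (by norm_num) hbytes]
  simp only [Int.toNat_zero, pow_zero, mul_one, zero_add, Nat.zero_add,
    List.length_map, List.length_range]
  rw [show (pvBytes ct.toList).length = pvNB ct.toList by simp [pvBytes]]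
  rw [show pvNB ct.toList + pvNB ct.toList / 7 = 8 * pvNB ct.toList / 7 by omega]
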